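-- pv_equiv track=rewrite | github.com/MrBrantCode/unitest_baseline | mut_generate/mist_train_taco/taco_5563/solution.py | can_be_represented_in_base
-- ===== SOURCE A (Python) =====
-- def can_be_represented_in_base(N: int, M: int) -> str:
--     S = set()
--     while N:
--         remainder = N % M
--         if remainder in S:
--             return 'NO'
--         else:
--             S.add(remainder)
--         N //= M
--     return 'YES'
-- ===== SOURCE B (Python) =====
-- def can_be_represented_in_base(N: int, M: int) -> str:
--     # Collect every base-M digit of N; the loop is guarded by cycle detection on
--     # N itself: if a value of N ever comes back, the expansion never terminates,
--     # so some digit certainly repeats.  Duplicate digits are then found offline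
--     # by sorting the collected digits and scanning adjacent pairs.
--     digits = []
--     visited = set()
--     while N:
--         if N in visited:
--             return 'NO'
--         visited.add(N)
--         digits.append(N % M)
--         N //= M
--     digits.sort()
--     return 'NO' if any(a == b for a, b in zip(digits, digits[1:])) else 'YES'
-- ===== Notes on version B (the rewrite author's own statement) =====
-- stated objective: alternative
-- what changed: A keeps a hash set of the digits and returns 'NO' the moment a digit repeats; B never tests digits inside the loop: it guards the loop by cycle detection on N itself (a repeated value of N means the expansion never terminates, so a digit certainly repeats), collects all digits into a list, and finds duplicates offline by sorting and scanning adjacent pairs.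
-- outside the precondition, e.g. on can_be_represented_in_base(5, 0): A raises ZeroDivisionError, B raises ZeroDivisionError
import Mathlib
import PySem

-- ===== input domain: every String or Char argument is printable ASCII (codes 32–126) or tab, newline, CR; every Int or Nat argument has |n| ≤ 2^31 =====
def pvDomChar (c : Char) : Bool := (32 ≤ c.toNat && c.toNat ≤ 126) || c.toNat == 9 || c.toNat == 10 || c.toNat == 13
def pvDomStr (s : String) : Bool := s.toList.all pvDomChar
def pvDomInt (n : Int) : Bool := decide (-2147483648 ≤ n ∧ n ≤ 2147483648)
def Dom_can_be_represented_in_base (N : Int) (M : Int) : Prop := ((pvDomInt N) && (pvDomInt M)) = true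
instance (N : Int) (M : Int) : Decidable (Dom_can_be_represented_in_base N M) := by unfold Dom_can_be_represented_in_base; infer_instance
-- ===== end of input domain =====

-- B replaces A's in-loop digit-set membership test with cycle detection on N itself
-- (a repeated N means a non-terminating expansion, hence a repeated digit) plus an
-- offline sort-then-adjacent-scan duplicate check (alternative decomposition, same cost).


-- ===== PORT A =====
-- A's while loop; the fuel M.natAbs + 2 only makes the recursion total: within Pre_
-- the loop returns within that many iterations (each continuing step adds a fresh
-- residue to S and there are only M.natAbs residues).
def pvALoop : Nat → PySem.Set Int → Int → Int → String
  | 0, _, _, _ => "YES"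
  | fuel+1, S, N, M =>
    if N = 0 then "YES"
    else
      let r := PySem.Int.mod N M
      if PySem.Set.contains S r then "NO"
      else pvALoop fuel (PySem.Set.add S r) (PySem.Int.floordiv N M) M

def can_be_represented_in_base (N : Int) (M : Int) : String :=
  pvALoop (M.natAbs + 2) PySem.Set.empty N M

-- ===== PORT B =====
-- digits.sort(); return 'NO' if any(a == b for a, b in zip(digits, digits[1:])) else 'YES'
def pvAdjDup (s : List Int) : Bool :=
  (s.zip (PySem.List.slice s (some 1) none)).any (fun p => p.1 == p.2)

def pvFinish (digits : List Int) : String :=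
  if pvAdjDup (PySem.List.sorted digits (fun x => x) false) then "NO" else "YES"

-- B's while loop with its cycle-detection guard on N; the fuel 2*N.natAbs + 2 only
-- makes the recursion total: |N // M| ≤ |N|, so all visited values of N stay in
-- [-|N0|, |N0|] and a repeat (or 0) is reached within that many iterations.
def pvBLoop : Nat → PySem.Set Int → List Int → Int → Int → String
  | 0, _, digits, _, _ => pvFinish digits
  | k+1, visited, digits, N, M =>
    if N = 0 then pvFinish digits
    else if PySem.Set.contains visited N then "NO"
    else pvBLoop k (PySem.Set.add visited N) (digits ++ [PySem.Int.mod N M]) (PySem.Int.floordiv N M) M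

def can_be_represented_in_base_alt (N : Int) (M : Int) : String :=
  pvBLoop (2 * N.natAbs + 2) PySem.Set.empty [] N M

-- ===== PRECONDITION & SPEC =====
-- Pre_ excludes only M = 0 with N ≠ 0, where Python A raises ZeroDivisionError.
def Pre_can_be_represented_in_base (N : Int) (M : Int) : Prop := N = 0 ∨ M ≠ 0
instance (N : Int) (M : Int) : Decidable (Pre_can_be_represented_in_base N M) := by unfold Pre_can_be_represented_in_base; infer_instance
def pvWitness_can_be_represented_in_base : Int × Int := (11, 3)

def Spec_can_be_represented_in_base (N : Int) (M : Int) (out : String) : Prop := out = can_be_represented_in_base_alt N M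
instance (N : Int) (M : Int) (out : String) : Decidable (Spec_can_be_represented_in_base N M out) := by unfold Spec_can_be_represented_in_base; infer_instance

-- ===== CLAIM (what is proved, stated in full; the proofs are below) =====
def Claim_equal_can_be_represented_in_base : Prop := ∀ (N : Int) (M : Int), Dom_can_be_represented_in_base N M → Pre_can_be_represented_in_base N M → Spec_can_be_represented_in_base N M (can_be_represented_in_base N M)

-- ===== LEMMAS AND PROOFS =====

-- One-step unfolding lemmas for the two loops.
theorem pvALoop_of_zero (fuel : Nat) (S : PySem.Set Int) (M : Int) :
    pvALoop (fuel+1) S 0 M = "YES" := by simp [pvALoop]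

theorem pvALoop_step (fuel : Nat) (S : PySem.Set Int) (N M : Int) (hN : N ≠ 0) :
    pvALoop (fuel+1) S N M
      = (if PySem.Set.contains S (PySem.Int.mod N M) then "NO"
          else pvALoop fuel (PySem.Set.add S (PySem.Int.mod N M)) (PySem.Int.floordiv N M) M) := by
  simp only [pvALoop, if_neg hN]

theorem pvBLoop_of_zero (k : Nat) (visited : PySem.Set Int) (digits : List Int) (M : Int) :
    pvBLoop (k+1) visited digits 0 M = pvFinish digits := by simp [pvBLoop]

theorem pvBLoop_seen (k : Nat) (visited : PySem.Set Int) (digits : List Int) (N M : Int)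
    (hN : N ≠ 0) (h : PySem.Set.contains visited N = true) :
    pvBLoop (k+1) visited digits N M = "NO" := by
  simp only [pvBLoop, if_neg hN, if_pos h]

theorem pvBLoop_step (k : Nat) (visited : PySem.Set Int) (digits : List Int) (N M : Int)
    (hN : N ≠ 0) (h : PySem.Set.contains visited N = false) :
    pvBLoop (k+1) visited digits N M
      = pvBLoop k (PySem.Set.add visited N) (digits ++ [PySem.Int.mod N M]) (PySem.Int.floordiv N M) M := by
  simp only [pvBLoop, if_neg hN, h, Bool.false_eq_true, if_false]

-- Set.ofList over an appended singleton is Set.add (used for both growing sets).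
theorem pv_ofList_append_singleton (l : List Int) (x : Int) :
    PySem.Set.ofList (l ++ [x]) = PySem.Set.add (PySem.Set.ofList l) x := by
  simp [PySem.Set.ofList_eq_foldl, List.foldl_append]

-- The adjacent-pair scan of a list is false exactly when adjacent entries differ.
theorem pv_adjDup_false_iff (s : List Int) :
    pvAdjDup s = false ↔ s.IsChain (· ≠ ·) := by
  unfold pvAdjDup
  rw [PySem.List.slice_from_one]
  induction s with
  | nil => simp
  | cons a t ih =>
    cases t with
    | nil => simp
    | cons b u =>
      rw [List.isChain_cons_cons]
      simp only [List.tail_cons, List.zip_cons_cons, List.any_cons, Bool.or_eq_false_iff,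
        beq_eq_false_iff_ne, ne_eq] at *
      constructor
      · rintro ⟨h1, h2⟩; exact ⟨h1, ih.1 h2⟩
      · rintro ⟨h1, h2⟩; exact ⟨h1, ih.2 h2⟩

-- In a (≤)-chained list, adjacent inequality upgrades to adjacent strictness.
theorem pv_chain_lt (s : List Int) (h1 : s.IsChain (· ≤ ·)) (h2 : s.IsChain (· ≠ ·)) :
    s.IsChain (· < ·) := by
  induction s with
  | nil => exact List.isChain_nil
  | cons a t ih =>
    cases t with
    | nil => exact List.isChain_singleton a
    | cons b u =>
      rw [List.isChain_cons_cons] at h1 h2 ⊢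
      exact ⟨lt_of_le_of_ne h1.1 h2.1, ih h1.2 h2.2⟩

-- For a (≤)-sorted list, no adjacent duplicate ⟺ no duplicate at all.
theorem pv_chain_ne_iff_nodup (s : List Int) (h : s.Pairwise (· ≤ ·)) :
    s.IsChain (· ≠ ·) ↔ s.Nodup := by
  constructor
  · intro hc
    have hlt : s.IsChain (· < ·) := pv_chain_lt s h.isChain hc
    have hp : s.Pairwise (· < ·) := List.isChain_iff_pairwise.1 hlt
    exact hp.imp (fun h => ne_of_lt h)
  · intro hn
    exact hn.isChain

-- B's final check answers exactly "are the collected digits distinct".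
theorem pv_check_iff (l : List Int) :
    pvFinish l = (if l.Nodup then "YES" else "NO") := by
  unfold pvFinish
  have hperm : (PySem.List.sorted l (fun x => x) false).Perm l :=
    PySem.List.sorted_perm l (fun x => x) false
  have hpw : (PySem.List.sorted l (fun x => x) false).Pairwise (· ≤ ·) := by
    simpa using PySem.List.sorted_pairwise (xs := l) (key := fun x : Int => x)
  by_cases h : l.Nodup
  · have hs : (PySem.List.sorted l (fun x => x) false).Nodup := hperm.nodup_iff.2 h
    rw [if_pos h,
      if_neg (by rw [Bool.not_eq_true, pv_adjDup_false_iff]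
                 exact (pv_chain_ne_iff_nodup _ hpw).2 hs)]
  · have hs : ¬ (PySem.List.sorted l (fun x => x) false).Nodup := fun hh => h (hperm.nodup_iff.1 hh)
    rw [if_neg h]
    rw [if_pos (by
      rcases Bool.eq_false_or_eq_true (pvAdjDup (PySem.List.sorted l (fun x => x) false)) with ht | hf
      · exact ht
      · exact absurd ((pv_chain_ne_iff_nodup _ hpw).1 ((pv_adjDup_false_iff _).1 hf)) hs)]

-- Once the accumulated digits contain a duplicate, B's answer is "NO".
theorem pvB_no_of_dup (k : Nat) (visited : PySem.Set Int) (digits : List Int) (N M : Int)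
    (h : ¬ digits.Nodup) : pvBLoop k visited digits N M = "NO" := by
  induction k generalizing visited digits N with
  | zero => show pvFinish digits = "NO"; rw [pv_check_iff, if_neg h]
  | succ k ih =>
    by_cases hN : N = 0
    · subst hN; rw [pvBLoop_of_zero, pv_check_iff, if_neg h]
    · rcases Bool.eq_false_or_eq_true (PySem.Set.contains visited N) with hc | hc
      · rw [pvBLoop_seen _ _ _ _ _ hN hc]
      · rw [pvBLoop_step _ _ _ _ _ hN hc]
        exact ih _ _ _ (fun hh => h hh.of_append_left)

-- Residues of mod · M lie in an interval of size M.natAbs.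
theorem pv_mod_mem (M d : Int) (hM : M ≠ 0) (hd : ∃ x, d = PySem.Int.mod x M) :
    d ∈ (if 0 < M then Finset.Ico 0 M else Finset.Ioc M 0) := by
  obtain ⟨x, rfl⟩ := hd
  rcases lt_or_gt_of_ne hM with hneg | hpos
  · rw [if_neg (not_lt_of_gt hneg), Finset.mem_Ioc]
    have := PySem.Int.mod_neg_bounds (a := x) hneg
    exact ⟨this.1, this.2⟩
  · rw [if_pos hpos, Finset.mem_Ico]
    exact ⟨PySem.Int.mod_nonneg (a := x) hpos, PySem.Int.mod_lt (a := x) hpos⟩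

-- Pigeonhole: a nodup list of residues mod M has at most M.natAbs elements.
theorem pv_pigeonhole (M : Int) (hM : M ≠ 0) (digits : List Int)
    (hnd : digits.Nodup) (hres : ∀ d ∈ digits, ∃ x, d = PySem.Int.mod x M) :
    digits.length ≤ M.natAbs := by
  have hsub : digits.toFinset ⊆ (if 0 < M then Finset.Ico 0 M else Finset.Ioc M 0) := by
    intro d hd
    exact pv_mod_mem M d hM (hres d (List.mem_toFinset.1 hd))
  have hcard := Finset.card_le_card hsub
  rw [List.toFinset_card_of_nodup hnd] at hcard
  rcases lt_or_gt_of_ne hM with hneg | hpos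
  · rw [if_neg (not_lt_of_gt hneg), Int.card_Ioc] at hcard
    omega
  · rw [if_pos hpos, Int.card_Ico] at hcard
    omega

-- Floor division by a positive M keeps the quotient within [-|N|, |N|].
theorem pv_fdiv_le (N M : Int) (h : 0 < M) :
    -(N.natAbs : Int) ≤ PySem.Int.floordiv N M ∧ PySem.Int.floordiv N M ≤ (N.natAbs : Int) := by
  constructor
  · rw [PySem.Int.le_floordiv_iff_mul_le h]
    have key : (N.natAbs : Int) * 1 ≤ (N.natAbs : Int) * M :=
      mul_le_mul_of_nonneg_left (by omega) (by positivity)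
    rw [neg_mul]
    omega
  · have hlt := (PySem.Int.floordiv_lt_iff_lt_mul (a := N) (q := (N.natAbs : Int) + 1) h).2
    have key : ((N.natAbs : Int) + 1) * 1 ≤ ((N.natAbs : Int) + 1) * M :=
      mul_le_mul_of_nonneg_left (by omega) (by positivity)
    have := hlt (by omega)
    omega

-- |N // M| ≤ |N| for M ≠ 0 (so all loop states of B stay in [-|N0|, |N0|]).
theorem pv_fdiv_natAbs_le (N M : Int) (hM : M ≠ 0) :
    (PySem.Int.floordiv N M).natAbs ≤ N.natAbs := by
  rcases lt_or_gt_of_ne hM with hneg | hpos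
  · have h := pv_fdiv_le (-N) (-M) (by omega)
    rw [PySem.Int.floordiv_neg_neg, Int.natAbs_neg] at h
    omega
  · have h := pv_fdiv_le N M hpos
    omega

-- Pigeonhole: a nodup list of states in [-A0, A0] has at most 2*A0 + 1 elements.
theorem pv_state_pigeonhole (A0 : Nat) (seen : List Int) (hnd : seen.Nodup)
    (hb : ∀ s ∈ seen, s.natAbs ≤ A0) : seen.length ≤ 2 * A0 + 1 := by
  have hsub : seen.toFinset ⊆ Finset.Icc (-(A0 : Int)) (A0 : Int) := by
    intro s hs
    have := hb s (List.mem_toFinset.1 hs)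
    rw [Finset.mem_Icc]
    omega
  have hcard := Finset.card_le_card hsub
  rw [List.toFinset_card_of_nodup hnd, Int.card_Icc] at hcard
  omega

-- Main lockstep invariant: A's loop (set = residues of the visited states) agrees
-- with B's loop (visited = states seen so far, digits = their residues in order),
-- as long as the digits so far are distinct.
theorem pv_key (kB : Nat) (seen : List Int) (N M : Int) (kA : Nat) (A0 : Nat)
    (hM : M ≠ 0)
    (hnd : (seen.map (fun s => PySem.Int.mod s M)).Nodup)
    (hsnd : seen.Nodup)
    (hbs : ∀ s ∈ seen, s.natAbs ≤ A0)
    (hbN : N.natAbs ≤ A0)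
    (hlenB : seen.length + kB = 2 * A0 + 2)
    (hlenA : seen.length + kA = M.natAbs + 1) :
    pvALoop (kA+1) (PySem.Set.ofList (seen.map (fun s => PySem.Int.mod s M))) N M
      = pvBLoop kB (PySem.Set.ofList seen) (seen.map (fun s => PySem.Int.mod s M)) N M := by
  induction kB generalizing seen N kA with
  | zero =>
    have := pv_state_pigeonhole A0 seen hsnd hbs
    omega
  | succ kB ih =>
    by_cases hN : N = 0
    · subst hN
      rw [pvALoop_of_zero, pvBLoop_of_zero, pv_check_iff, if_pos hnd]
    · by_cases hvis : N ∈ seen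
      · have hcB : PySem.Set.contains (PySem.Set.ofList seen) N = true :=
          (PySem.Set.contains_iff _ _).2 ((PySem.Set.mem_ofList _ _).2 hvis)
        have hmem : PySem.Int.mod N M ∈ seen.map (fun s => PySem.Int.mod s M) :=
          List.mem_map.2 ⟨N, hvis, rfl⟩
        have hcA : PySem.Set.contains (PySem.Set.ofList (seen.map (fun s => PySem.Int.mod s M)))
            (PySem.Int.mod N M) = true :=
          (PySem.Set.contains_iff _ _).2 ((PySem.Set.mem_ofList _ _).2 hmem)
        rw [pvALoop_step _ _ _ _ hN, if_pos hcA, pvBLoop_seen _ _ _ _ _ hN hcB]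
      · have hcB : PySem.Set.contains (PySem.Set.ofList seen) N = false := by
          rw [Bool.eq_false_iff]
          intro hc
          exact hvis ((PySem.Set.mem_ofList _ _).1 ((PySem.Set.contains_iff _ _).1 hc))
        rw [pvALoop_step _ _ _ _ hN, pvBLoop_step _ _ _ _ _ hN hcB,
          ← pv_ofList_append_singleton]
        by_cases hr : PySem.Int.mod N M ∈ seen.map (fun s => PySem.Int.mod s M)
        · have hcA : PySem.Set.contains (PySem.Set.ofList (seen.map (fun s => PySem.Int.mod s M)))
              (PySem.Int.mod N M) = true :=
            (PySem.Set.contains_iff _ _).2 ((PySem.Set.mem_ofList _ _).2 hr)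
          rw [if_pos hcA]
          exact (pvB_no_of_dup _ _ _ _ _ (fun hh => by
            rcases List.nodup_append.1 hh with ⟨_, _, hdisj⟩
            exact hdisj _ hr _ (by simp) rfl)).symm
        · have hcA : PySem.Set.contains (PySem.Set.ofList (seen.map (fun s => PySem.Int.mod s M)))
              (PySem.Int.mod N M) = false := by
            rw [Bool.eq_false_iff]
            intro hc
            exact hr ((PySem.Set.mem_ofList _ _).1 ((PySem.Set.contains_iff _ _).1 hc))
          rw [if_neg (by rw [hcA]; exact Bool.false_ne_true), ← pv_ofList_append_singleton]
          have hle : (seen.map (fun s => PySem.Int.mod s M)).length ≤ M.natAbs :=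
            pv_pigeonhole M hM _ hnd (fun d hd => by
              obtain ⟨s, _, rfl⟩ := List.mem_map.1 hd
              exact ⟨s, rfl⟩)
          rw [List.length_map] at hle
          cases kA with
          | zero => omega
          | succ kA' =>
            have hmapapp : (seen ++ [N]).map (fun s => PySem.Int.mod s M)
                = seen.map (fun s => PySem.Int.mod s M) ++ [PySem.Int.mod N M] := by
              simp
            have h := ih (seen ++ [N]) (PySem.Int.floordiv N M) kA'
              (by rw [hmapapp, List.nodup_append]
                  exact ⟨hnd, List.nodup_singleton _,
                    fun a ha b hb => by
                      simp only [List.mem_singleton] at hb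
                      subst hb
                      exact fun he => hr (he ▸ ha)⟩)
              (by rw [List.nodup_append]
                  exact ⟨hsnd, List.nodup_singleton _,
                    fun a ha b hb => by
                      simp only [List.mem_singleton] at hb
                      subst hb
                      exact fun he => hvis (he ▸ ha)⟩)
              (by intro s hs
                  rcases List.mem_append.1 hs with h | h
                  · exact hbs s h
                  · simp only [List.mem_singleton] at h
                    subst h
                    exact hbN)
              (le_trans (pv_fdiv_natAbs_le N M hM) hbN)
              (by simp only [List.length_append, List.length_singleton]; omega)
              (by simp only [List.length_append, List.length_singleton]; omega)
            rw [hmapapp] at h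
            exact h

-- ===== VERDICT (by name: the statement is the Claim_ definition above) =====
theorem can_be_represented_in_base_spec : Claim_equal_can_be_represented_in_base := by
  intro N M _ hpre
  unfold Spec_can_be_represented_in_base can_be_represented_in_base can_be_represented_in_base_alt
  by_cases hM : M = 0
  · rcases hpre with hN | hM'
    · subst hN hM; decide
    · exact absurd hM hM'
  · have h := pv_key (2 * N.natAbs + 2) [] N M (M.natAbs + 1) N.natAbs hM
      (by simp) (by simp) (by simp) le_rfl (by simp) (by simp)
    simpa [PySem.Set.ofList] using h
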